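-- pv_equiv track=rewrite | github.com/BanmaXM/Mindgame | expansion_colonel_blotto/run_colonel_blotto.py | _dedupe_lines
-- ===== SOURCE A (Python) =====
-- from typing import Dict, Any, List
--
-- def _dedupe_lines(text: str) -> str:
--     lines = text.splitlines()
--     seen = set()
--     result: List[str] = []
--     prev_blank = False
--     for ln in lines:
--         key = ln.strip()
--         is_blank = (key == "")
--         if not is_blank:
--             if key not in seen:
--                 seen.add(key)
--                 result.append(ln)
--                 prev_blank = False
--             else:
--                 continue
--         else:
--             if not prev_blank:
--                 result.append("")
--                 prev_blank = True
--     while result and result[0].strip() == "":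
--         result.pop(0)
--     while result and result[-1].strip() == "":
--         result.pop()
--     return "\n".join(result)
-- ===== SOURCE B (Python) =====
-- from itertools import groupby
-- from typing import List
--
-- def _dedupe_lines(text: str) -> str:
--     # Pass 1: dedupe on the stripped key, keeping the original text of first
--     # occurrences; whitespace-only lines become a '' blank marker.
--     seen = set()
--     mid: List[str] = []
--     for ln in text.splitlines():
--         key = ln.strip()
--         if key == "":
--             mid.append("")
--         elif key not in seen:
--             seen.add(key)
--             mid.append(ln)
--     # Pass 2: collapse each run of blank markers to a single ''.
--     parts: List[str] = []
--     for blank, grp in groupby(mid, key=lambda s: s == ""):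
--         if blank:
--             parts.append("")
--         else:
--             parts.extend(grp)
--     # Trim a leading/trailing blank marker.
--     while parts and parts[0] == "":
--         parts.pop(0)
--     while parts and parts[-1] == "":
--         parts.pop()
--     return "\n".join(parts)
-- ===== Notes on version B (the rewrite author's own statement) =====
-- stated objective: alternative
-- what changed: Replaces the single interleaved loop with a prev_blank flag by two separate passes: a dedup pass emitting blank markers, then an itertools.groupby pass collapsing blank runs, with end trimming on the markers.
import Mathlib
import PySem

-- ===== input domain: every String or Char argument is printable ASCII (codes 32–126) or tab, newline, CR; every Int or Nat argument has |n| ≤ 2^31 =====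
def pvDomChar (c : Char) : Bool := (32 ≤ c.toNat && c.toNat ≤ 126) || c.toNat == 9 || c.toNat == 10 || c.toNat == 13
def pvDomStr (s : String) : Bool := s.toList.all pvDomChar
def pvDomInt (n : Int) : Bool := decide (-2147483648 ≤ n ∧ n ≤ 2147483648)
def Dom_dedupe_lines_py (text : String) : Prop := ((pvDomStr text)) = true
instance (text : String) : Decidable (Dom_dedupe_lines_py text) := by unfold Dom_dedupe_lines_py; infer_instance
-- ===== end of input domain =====

-- B replaces A's single interleaved loop (dedup + prev_blank flag) by two separate
-- passes: a dedup pass emitting '' blank markers, then a groupby-style pass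
-- collapsing blank runs, plus end trimming on the markers (objective: alternative).

-- ===== PORT A =====
-- A's single loop over the lines: state (seen, result, prev_blank).
def pvAStep (st : PySem.Set String × List String × Bool) (ln : String) :
    PySem.Set String × List String × Bool :=
  let seen := st.1
  let result := st.2.1
  let prev_blank := st.2.2
  let key := PySem.Str.strip ln
  let is_blank := key == ""
  if !is_blank then
    if !(PySem.Set.contains seen key) then
      (PySem.Set.add seen key, result ++ [ln], false)
    else
      st                                -- 'continue'
  else
    if !prev_blank then (seen, result ++ [""], true) else st

-- 'while result and result[0].strip() == "": result.pop(0)'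
def pvATrimFront : List String → List String
  | [] => []
  | x :: xs => if PySem.Str.strip x == "" then pvATrimFront xs else x :: xs

def dedupe_lines_py (text : String) : String :=
  let lines := PySem.Str.splitlines text
  let st := lines.foldl pvAStep (PySem.Set.empty, [], false)
  -- the two trailing while-pop loops, the second phrased on the reverse
  let result := pvATrimFront st.2.1
  let result := (pvATrimFront result.reverse).reverse
  PySem.Str.join "\n" result

-- ===== PORT B =====
-- Pass 1 of Source B: dedupe on the stripped key, blanks become '' markers.
def pvBStep (st : PySem.Set String × List String) (ln : String) :
    PySem.Set String × List String :=
  let seen := st.1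
  let mid := st.2
  let key := PySem.Str.strip ln
  if key == "" then (seen, mid ++ [""])
  else if PySem.Set.contains seen key then st
  else (PySem.Set.add seen key, mid ++ [ln])

-- Pass 2 of Source B: itertools.groupby on (s == ""), one '' per blank run.
def pvBCollapse : List String → List String
  | [] => []
  | s :: rest =>
    if s == "" then "" :: pvBCollapse (rest.dropWhile (· == ""))
    else s :: pvBCollapse rest
termination_by l => l.length
decreasing_by
  · exact Nat.lt_succ_of_le (List.length_dropWhile_le _ _)
  · simp

-- 'while parts and parts[0] == "": parts.pop(0)'
def pvBTrimFront : List String → List String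
  | [] => []
  | x :: xs => if x == "" then pvBTrimFront xs else x :: xs

def dedupe_lines_py_alt (text : String) : String :=
  let mid := ((PySem.Str.splitlines text).foldl pvBStep (PySem.Set.empty, [])).2
  let parts := pvBCollapse mid
  let parts := pvBTrimFront parts
  let parts := (pvBTrimFront parts.reverse).reverse
  PySem.Str.join "\n" parts

-- ===== PRECONDITION & SPEC =====
def Spec_dedupe_lines_py (text : String) (out : String) : Prop := out = dedupe_lines_py_alt text
instance (text : String) (out : String) : Decidable (Spec_dedupe_lines_py text out) := by unfold Spec_dedupe_lines_py; infer_instance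

-- ===== CLAIM (what is proved, stated in full; the proofs are below) =====
def Claim_equal_dedupe_lines_py : Prop := ∀ (text : String), Dom_dedupe_lines_py text → Spec_dedupe_lines_py text (dedupe_lines_py text)

-- ===== LEMMAS AND PROOFS =====

-- The deduped intermediate list produced from lines ls with seen-set 'seen'.
def pvMid : List String → PySem.Set String → List String
  | [], _ => []
  | ln :: ls, seen =>
    let key := PySem.Str.strip ln
    if key == "" then "" :: pvMid ls seen
    else if PySem.Set.contains seen key then pvMid ls seen
    else ln :: pvMid ls (PySem.Set.add seen key)

-- A's interleaved collapse, parameterised by the prev_blank flag.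
def pvColP : Bool → List String → List String
  | _, [] => []
  | pb, s :: rest =>
    if s == "" then (if pb then pvColP true rest else "" :: pvColP true rest)
    else s :: pvColP false rest

theorem pvBfold_eq (ls : List String) (seen : PySem.Set String) (mid : List String) :
    (ls.foldl pvBStep (seen, mid)).2 = mid ++ pvMid ls seen := by
  induction ls generalizing seen mid with
  | nil => simp [pvMid]
  | cons ln ls ih =>
    simp only [List.foldl_cons, pvBStep, pvMid]
    by_cases h1 : PySem.Str.strip ln == ""
    · simp [h1, ih]
    · by_cases h2 : PySem.Str.strip ln ∈ seen
      · simp [h1, h2, ih]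
      · simp [h1, h2, ih]

theorem pvColP_blank_true (rest : List String) :
    pvColP true ("" :: rest) = pvColP true rest := by
  rw [pvColP.eq_def]; simp

theorem pvColP_blank_false (rest : List String) :
    pvColP false ("" :: rest) = "" :: pvColP true rest := by
  rw [pvColP.eq_def]; simp

theorem pvColP_nonblank (pb : Bool) (s : String) (rest : List String) (h : ¬ (s == "")) :
    pvColP pb (s :: rest) = s :: pvColP false rest := by
  rw [pvColP.eq_def]; simp [h]

theorem pvAfold_eq (ls : List String) (seen : PySem.Set String) (res : List String) (pb : Bool) :
    (ls.foldl pvAStep (seen, res, pb)).2.1 = res ++ pvColP pb (pvMid ls seen) := by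
  induction ls generalizing seen res pb with
  | nil => simp [pvMid, pvColP]
  | cons ln ls ih =>
    rw [List.foldl_cons]
    by_cases h1 : PySem.Str.strip ln == ""
    · have hmid : pvMid (ln :: ls) seen = "" :: pvMid ls seen := by
        rw [pvMid]; simp [h1]
      cases pb with
      | true =>
        have estep : pvAStep (seen, res, true) ln = (seen, res, true) := by
          simp [pvAStep, h1]
        rw [estep, ih, hmid, pvColP_blank_true]
      | false =>
        have estep : pvAStep (seen, res, false) ln = (seen, res ++ [""], true) := by
          simp [pvAStep, h1]
        rw [estep, ih, hmid, pvColP_blank_false]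
        simp
    · have hln : ¬ (ln == "") := by
        intro h
        apply h1
        have : ln = "" := by simpa using h
        subst this
        decide
      by_cases h2 : PySem.Str.strip ln ∈ seen
      · have estep : pvAStep (seen, res, pb) ln = (seen, res, pb) := by
          simp [pvAStep, h1, h2]
        have hmid : pvMid (ln :: ls) seen = pvMid ls seen := by
          rw [pvMid]; simp [h1, h2]
        rw [estep, ih, hmid]
      · have estep : pvAStep (seen, res, pb) ln =
            (PySem.Set.add seen (PySem.Str.strip ln), res ++ [ln], false) := by
          simp [pvAStep, h1, h2]
        have hmid : pvMid (ln :: ls) seen =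
            ln :: pvMid ls (PySem.Set.add seen (PySem.Str.strip ln)) := by
          rw [pvMid]; simp [h1, h2]
        rw [estep, ih, hmid, pvColP_nonblank _ _ _ hln]
        simp

theorem pvColP_true (m : List String) :
    pvColP true m = pvColP false (m.dropWhile (· == "")) := by
  induction m with
  | nil => simp [pvColP]
  | cons s rest ih =>
    by_cases h : s == ""
    · simp [pvColP, h, List.dropWhile, ih]
    · simp [pvColP, h, List.dropWhile]

theorem pvColP_false_eq_collapse (m : List String) :
    pvColP false m = pvBCollapse m := by
  induction m using pvBCollapse.induct with
  | case1 => simp [pvColP, pvBCollapse]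
  | case2 s rest h ih =>
    rw [pvColP, pvBCollapse]
    simp [h, pvColP_true, ih]
  | case3 s rest h ih =>
    rw [pvColP, pvBCollapse]
    simp [h, ih]

-- every element of pvMid is '' or has a non-empty strip
theorem pvMid_inv (ls : List String) (seen : PySem.Set String) :
    ∀ s ∈ pvMid ls seen, s = "" ∨ ¬ (PySem.Str.strip s = "") := by
  induction ls generalizing seen with
  | nil => simp [pvMid]
  | cons ln ls ih =>
    intro s hs
    rw [pvMid] at hs
    by_cases h1 : PySem.Str.strip ln == ""
    · simp only [h1, if_pos, List.mem_cons] at hs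
      rcases hs with h | h
      · exact Or.inl h
      · exact ih seen s h
    · by_cases h2 : PySem.Set.contains seen (PySem.Str.strip ln)
      · simp only [h1, h2, if_neg, if_pos, Bool.false_eq_true, not_false_eq_true] at hs
        exact ih seen s hs
      · simp only [h1, h2, Bool.false_eq_true, not_false_eq_true, if_neg, List.mem_cons] at hs
        rcases hs with h | h
        · subst h; exact Or.inr (by simpa using h1)
        · exact ih _ s h

theorem pvBCollapse_mem (m : List String) :
    ∀ s ∈ pvBCollapse m, s = "" ∨ s ∈ m := by
  induction m using pvBCollapse.induct with
  | case1 => simp [pvBCollapse]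
  | case2 s rest h ih =>
    intro x hx
    rw [pvBCollapse] at hx
    simp only [h, if_pos, List.mem_cons] at hx
    rcases hx with h' | h'
    · exact Or.inl h'
    · rcases ih x h' with h'' | h''
      · exact Or.inl h''
      · exact Or.inr (List.mem_cons_of_mem _ ((List.dropWhile_sublist _).subset h''))
  | case3 s rest h ih =>
    intro x hx
    rw [pvBCollapse] at hx
    simp only [h, if_neg, List.mem_cons, Bool.false_eq_true, not_false_eq_true] at hx
    rcases hx with h' | h'
    · exact Or.inr (by simp [h'])
    · rcases ih x h' with h'' | h''
      · exact Or.inl h''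
      · exact Or.inr (List.mem_cons_of_mem _ h'')

-- on such elements A's trim predicate agrees with B's, so the trims agree
theorem pvTrim_eq (l : List String) (h : ∀ s ∈ l, s = "" ∨ ¬ (PySem.Str.strip s = "")) :
    pvATrimFront l = pvBTrimFront l := by
  induction l with
  | nil => rfl
  | cons x xs ih =>
    rcases h x (by simp) with hx | hx
    · subst hx
      rw [pvATrimFront, pvBTrimFront,
        if_pos (by decide : (PySem.Str.strip "" == "") = true),
        if_pos (by decide : (("" : String) == "") = true)]
      exact ih (fun s hs => h s (List.mem_cons_of_mem _ hs))
    · have hx' : ¬ (x = "") := by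
        intro h'; subst h'; exact hx rfl
      rw [pvATrimFront, pvBTrimFront]
      simp [hx, hx']

theorem pvTrim_mem (l : List String) : ∀ s ∈ pvBTrimFront l, s ∈ l := by
  induction l with
  | nil => simp [pvBTrimFront]
  | cons x xs ih =>
    intro s hs
    rw [pvBTrimFront] at hs
    by_cases h : x == ""
    · exact List.mem_cons_of_mem _ (ih s (by simpa [h] using hs))
    · simpa [h] using hs

-- ===== VERDICT (by name: the statement is the Claim_ definition above) =====
theorem dedupe_lines_py_spec : Claim_equal_dedupe_lines_py := by
  intro text _
  unfold Spec_dedupe_lines_py dedupe_lines_py dedupe_lines_py_alt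
  simp only
  rw [pvAfold_eq, pvBfold_eq]
  simp only [List.nil_append]
  rw [pvColP_false_eq_collapse]
  have hinv : ∀ s ∈ pvBCollapse (pvMid (PySem.Str.splitlines text) PySem.Set.empty),
      s = "" ∨ ¬ (PySem.Str.strip s = "") := by
    intro s hs
    rcases pvBCollapse_mem _ s hs with h | h
    · exact Or.inl h
    · exact pvMid_inv _ _ s h
  rw [pvTrim_eq _ hinv]
  rw [pvTrim_eq]
  intro s hs
  exact hinv s (pvTrim_mem _ s (by simpa using hs))
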